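-- pv_equiv track=rewrite | github.com/pypi-data/pypi-mirror-360 | packages/dft-pipeline/dft_pipeline-0.3.22-py3-none-any.whl/dft/cli/commands/docs.py | extract_yaml_examples_html
-- ===== SOURCE A (Python) =====
-- def extract_yaml_examples_html(docstring):
--     """Extract YAML examples as HTML"""
--     if not docstring:
--         return ""
--
--     examples = []
--     lines = docstring.split('\n')
--     in_yaml_block = False
--     current_example = []
--     example_title = ""
--
--     for line in lines:
--         if 'yaml example' in line.lower():
--             if current_example and in_yaml_block:
--                 examples.append((example_title, '\n'.join(current_example)))
--             current_example = []
--             in_yaml_block = True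
--             example_title = line.strip().rstrip(':')
--             continue
--
--         if in_yaml_block:
--             if line.strip() and not line.startswith('    ') and not line.startswith('\t'):
--                 # End of example
--                 if current_example:
--                     examples.append((example_title, '\n'.join(current_example)))
--                 current_example = []
--                 in_yaml_block = False
--             else:
--                 if line.strip():
--                     current_example.append(line[4:] if line.startswith('    ') else line)
--                 elif current_example:
--                     current_example.append('')
--
--     if current_example and in_yaml_block:
--         examples.append((example_title, '\n'.join(current_example)))
--
--     if not examples:
--         return "<p>No YAML examples available.</p>"
--
--     html = ""
--     for title, content in examples:
--         html += f"""
--             <div class="yaml-example">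
--                 <h6>{title}</h6>
--                 <pre><code class="yaml">{content}</code></pre>
--             </div>
--         """
--
--     return html
-- ===== SOURCE B (Python) =====
-- def extract_yaml_examples_html(docstring):
--     """Extract YAML examples as HTML (per-marker forward scans instead of a state machine)"""
--     if not docstring:
--         return ""
--
--     lines = docstring.split('\n')
--
--     def is_marker(l):
--         return 'yaml example' in l.lower()
--
--     examples = []
--     for i, line in enumerate(lines):
--         if not is_marker(line):
--             continue
--         block = []
--         for l in lines[i + 1:]:
--             if is_marker(l) or (l.strip() and not l.startswith(('    ', '\t'))):
--                 break
--             if l.strip():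
--                 block.append(l[4:] if l.startswith('    ') else l)
--             elif block:
--                 block.append('')
--         if block:
--             examples.append((line.strip().rstrip(':'), '\n'.join(block)))
--
--     if not examples:
--         return "<p>No YAML examples available.</p>"
--
--     return ''.join(
--         f"""
--             <div class="yaml-example">
--                 <h6>{title}</h6>
--                 <pre><code class="yaml">{content}</code></pre>
--             </div>
--         """
--         for title, content in examples
--     )
-- ===== Notes on version B (the rewrite author's own statement) =====
-- stated objective: alternative
-- what changed: Replaces A's single-pass four-variable state machine (in_yaml_block/current_example/example_title with flush points) by a per-marker decomposition: find each marker line, scan forward independently for its content block, then join the formatted blocks.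
import Mathlib
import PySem

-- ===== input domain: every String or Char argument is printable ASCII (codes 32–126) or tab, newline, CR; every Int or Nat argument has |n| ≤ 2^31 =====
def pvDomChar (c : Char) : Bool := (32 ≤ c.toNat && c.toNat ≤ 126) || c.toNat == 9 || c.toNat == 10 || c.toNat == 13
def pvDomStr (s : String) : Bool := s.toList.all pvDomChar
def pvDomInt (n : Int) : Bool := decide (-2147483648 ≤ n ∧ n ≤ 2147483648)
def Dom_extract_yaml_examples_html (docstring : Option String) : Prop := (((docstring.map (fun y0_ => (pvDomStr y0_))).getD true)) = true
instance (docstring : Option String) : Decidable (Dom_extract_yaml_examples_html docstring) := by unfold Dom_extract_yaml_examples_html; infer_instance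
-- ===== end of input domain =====

-- B replaces A's four-variable state machine by a per-marker forward scan ('alternative' decomposition, same output byte for byte).

-- shared primitives (the same literal f-string and the same rstrip(':'), used identically by both Pythons)
-- exact port of Python's s.rstrip(':'): drop the trailing ':' characters (PySem has no rstrip-with-chars primitive)
def pvRstripColon (s : String) : String := String.ofList ((s.toList.reverse.dropWhile (· == ':')).reverse)

def pvFmt (title content : String) : String :=
  "\n            <div class=\"yaml-example\">\n                <h6>" ++ title ++
  "</h6>\n                <pre><code class=\"yaml\">" ++ content ++ "</code></pre>\n            </div>\n        "

-- ===== PORT A =====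
-- A's for-loop as structural recursion over the lines, state (examples, in_yaml_block, current_example, example_title);
-- the base case is the 'if current_example and in_yaml_block' flush that follows the loop in A.
def pvLoopA : List String → List (String × String) → Bool → List String → String → List (String × String)
  | [], examples, inB, cur, title =>
      if cur ≠ [] ∧ inB then examples ++ [(title, PySem.Str.join "\n" cur)] else examples
  | line :: rest, examples, inB, cur, title =>
      if PySem.Str.isIn "yaml example" (PySem.Str.lower line) then
        pvLoopA rest (if cur ≠ [] ∧ inB then examples ++ [(title, PySem.Str.join "\n" cur)] else examples)
          true [] (pvRstripColon (PySem.Str.strip line))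
      else if inB then
        if PySem.Str.strip line ≠ "" ∧ PySem.Str.startswith line "    " = false ∧ PySem.Str.startswith line "\t" = false then
          pvLoopA rest (if cur ≠ [] then examples ++ [(title, PySem.Str.join "\n" cur)] else examples) false [] title
        else
          if PySem.Str.strip line ≠ "" then
            pvLoopA rest examples inB
              (cur ++ [if PySem.Str.startswith line "    " then PySem.Str.slice line (some 4) none else line]) title
          else if cur ≠ [] then pvLoopA rest examples inB (cur ++ [""]) title
          else pvLoopA rest examples inB cur title
      else pvLoopA rest examples inB cur title

def extract_yaml_examples_html (docstring : Option String) : String :=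
  match docstring with
  | none => ""
  | some ds =>
    if ds = "" then "" else
    -- ds.split('\n'): split? is none only for sep = "", so getD is exact here
    let lines := (PySem.Str.split? ds "\n").getD []
    let examples := pvLoopA lines [] false [] ""
    if examples = [] then "<p>No YAML examples available.</p>"
    else examples.foldl (fun html tc => html ++ pvFmt tc.1 tc.2) ""

-- ===== PORT B =====
def pvIsMarker (line : String) : Bool := PySem.Str.isIn "yaml example" (PySem.Str.lower line)

def pvConv (l : String) : String :=
  if PySem.Str.startswith l "    " then PySem.Str.slice l (some 4) none else l

def pvStop (l : String) : Bool :=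
  pvIsMarker l || (PySem.Str.strip l != "" && !(PySem.Str.startswith l "    " || PySem.Str.startswith l "\t"))

-- B's inner 'for l in lines[i+1:] … break' loop
def pvTakeBlock (acc : List String) : List String → List String
  | [] => acc
  | l :: rest =>
    if pvStop l then acc
    else if PySem.Str.strip l ≠ "" then pvTakeBlock (acc ++ [pvConv l]) rest
    else if acc ≠ [] then pvTakeBlock (acc ++ [""]) rest
    else pvTakeBlock acc rest

-- B's outer enumerate loop: at each marker line, scan the following lines for its block
def pvCollect : List String → List (String × String)
  | [] => []
  | line :: rest =>
    if pvIsMarker line then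
      let block := pvTakeBlock [] rest
      if block ≠ [] then (pvRstripColon (PySem.Str.strip line), PySem.Str.join "\n" block) :: pvCollect rest
      else pvCollect rest
    else pvCollect rest

def extract_yaml_examples_html_alt (docstring : Option String) : String :=
  match docstring with
  | none => ""
  | some ds =>
    if ds = "" then "" else
    let lines := (PySem.Str.split? ds "\n").getD []
    let examples := pvCollect lines
    if examples = [] then "<p>No YAML examples available.</p>"
    else PySem.Str.join "" (examples.map (fun tc => pvFmt tc.1 tc.2))

-- ===== PRECONDITION & SPEC =====
def Spec_extract_yaml_examples_html (docstring : Option String) (out : String) : Prop := out = extract_yaml_examples_html_alt docstring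
instance (docstring : Option String) (out : String) : Decidable (Spec_extract_yaml_examples_html docstring out) := by unfold Spec_extract_yaml_examples_html; infer_instance

-- ===== CLAIM (what is proved, stated in full; the proofs are below) =====
def Claim_equal_extract_yaml_examples_html : Prop := ∀ (docstring : Option String), Dom_extract_yaml_examples_html docstring → Spec_extract_yaml_examples_html docstring (extract_yaml_examples_html docstring)

-- ===== LEMMAS AND PROOFS =====

-- A's state machine computes B's per-marker scans: out of a block it yields pvCollect,
-- inside a block (partial content acc, title t) it first finishes that block as pvTakeBlock does.
theorem pvLoopA_eq_collect (lines : List String) :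
    (∀ ex t, pvLoopA lines ex false [] t = ex ++ pvCollect lines) ∧
    (∀ ex acc t, pvLoopA lines ex true acc t =
      ex ++ (if pvTakeBlock acc lines = [] then []
             else [(t, PySem.Str.join "\n" (pvTakeBlock acc lines))]) ++ pvCollect lines) := by
  induction lines with
  | nil =>
      constructor
      · intro ex t; simp [pvLoopA, pvCollect]
      · intro ex acc t
        by_cases h : acc = [] <;> simp [pvLoopA, pvCollect, pvTakeBlock, h]
  | cons line rest ih =>
      obtain ⟨ih1, ih2⟩ := ih
      have hm : ∀ b, (pvIsMarker line = b) → PySem.Str.isIn "yaml example" (PySem.Str.lower line) = b := by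
        intro b hb; simpa [pvIsMarker] using hb
      constructor
      · intro ex t
        by_cases hmk : pvIsMarker line = true
        · rw [pvLoopA, if_pos (hm _ hmk)]
          rw [ih2]
          simp only [pvCollect, hmk, if_true]
          by_cases hb : pvTakeBlock [] rest = [] <;> simp [hb]
        · rw [pvLoopA, if_neg (by simpa using hm _ (by simpa using hmk))]
          simp only [Bool.false_eq_true, if_false, ih1]
          simp [pvCollect, hmk]
      · intro ex acc t
        by_cases hmk : pvIsMarker line = true
        · -- marker: A flushes and restarts; B's pvTakeBlock stops here
          rw [pvLoopA, if_pos (hm _ hmk)]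
          rw [ih2]
          have hstop : pvStop line = true := by unfold pvStop; rw [hmk]; rfl
          rw [pvTakeBlock, if_pos hstop]
          simp only [pvCollect, hmk, if_true]
          by_cases ha : acc = [] <;> by_cases hb : pvTakeBlock [] rest = [] <;>
            simp [ha, hb]
        · rw [pvLoopA, if_neg (by simpa using hm _ (by simpa using hmk))]
          have hmkf : pvIsMarker line = false := by simpa using hmk
          have hcol : pvCollect (line :: rest) = pvCollect rest := by simp [pvCollect, hmk]
          by_cases hterm : PySem.Str.strip line ≠ "" ∧ PySem.Str.startswith line "    " = false ∧ PySem.Str.startswith line "\t" = false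
          · -- terminator: A flushes and leaves the block; B's pvTakeBlock stops here
            rw [if_pos rfl, if_pos hterm, ih1]
            obtain ⟨h1, h2, h3⟩ := hterm
            have hstop : pvStop line = true := by
              unfold pvStop; rw [hmkf, h2, h3]
              simp [h1]
            rw [pvTakeBlock, if_pos hstop, hcol]
            by_cases ha : acc = [] <;> simp [ha]
          · rw [if_pos rfl, if_neg hterm]
            have hstop : pvStop line = false := by
              unfold pvStop; rw [hmkf]
              by_cases h1 : PySem.Str.strip line = ""
              · rw [h1]; rfl
              · have h4 : PySem.Str.startswith line "    " = true ∨ PySem.Str.startswith line "\t" = true := by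
                  by_contra hc
                  rw [not_or] at hc
                  exact hterm ⟨h1, by simpa using hc.1, by simpa using hc.2⟩
                rcases h4 with h | h <;> rw [h] <;> simp
            have hns : ¬ pvStop line = true := by rw [hstop]; exact Bool.false_ne_true
            by_cases hs : PySem.Str.strip line ≠ ""
            · rw [if_pos hs, ih2]
              rw [pvTakeBlock, if_neg hns, if_pos hs, hcol]
              rfl
            · rw [if_neg hs]
              by_cases ha : acc ≠ []
              · rw [if_pos ha, ih2, pvTakeBlock, if_neg hns, if_neg hs, if_pos ha, hcol]
              · rw [if_neg ha, ih2, pvTakeBlock, if_neg hns, if_neg hs, if_neg ha, hcol]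

-- ''.join(map(fmt, examples)) is A's html-accumulating loop
theorem foldl_fmt_eq_join (ex : List (String × String)) (s : String) :
    ex.foldl (fun html tc => html ++ pvFmt tc.1 tc.2) s =
      s ++ PySem.Str.join "" (ex.map (fun tc => pvFmt tc.1 tc.2)) := by
  induction ex generalizing s with
  | nil => simp [PySem.Str.join, PySem.Chars.join, List.intercalate]
  | cons a l ih =>
      rw [List.foldl_cons, ih]
      have : PySem.Str.join "" ((a :: l).map (fun tc => pvFmt tc.1 tc.2)) =
          pvFmt a.1 a.2 ++ PySem.Str.join "" (l.map (fun tc => pvFmt tc.1 tc.2)) := by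
        cases l <;> simp [PySem.Str.join, PySem.Chars.join, List.intercalate, String.ofList_append]
      rw [this, String.append_assoc]

-- ===== VERDICT (by name: the statement is the Claim_ definition above) =====
theorem extract_yaml_examples_html_spec : Claim_equal_extract_yaml_examples_html := by
  intro docstring _
  unfold Spec_extract_yaml_examples_html extract_yaml_examples_html extract_yaml_examples_html_alt
  cases docstring with
  | none => rfl
  | some ds =>
      by_cases h : ds = ""
      · simp [h]
      · simp only [h, if_false]
        have hex : pvLoopA ((PySem.Str.split? ds "\n").getD []) [] false [] "" =
            pvCollect ((PySem.Str.split? ds "\n").getD []) := by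
          simpa using (pvLoopA_eq_collect ((PySem.Str.split? ds "\n").getD [])).1 [] ""
        rw [hex]
        by_cases he : pvCollect ((PySem.Str.split? ds "\n").getD []) = []
        · simp [he]
        · simp only [he]
          simpa using foldl_fmt_eq_join (pvCollect ((PySem.Str.split? ds "\n").getD [])) ""
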